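-- pv_equiv track=rewrite | github.com/Pawo0/WDI | kolosy/zad1.2020.2021.py | multi
-- ===== SOURCE A (Python) =====
-- def multi(T: list):
--     maks = 0
--     for napis in T:
--         n = len(napis)
--         i = 1
--         while i <= n/2:
--             if n % i == 0:
--                 fragment = napis[:i]
--                 flag = True
--                 j = i
--                 while j < n:
--                     if fragment != napis[j:j+i]:
--                         flag = False
--                         break
--                     j += i
--                 if flag and n > maks:
--                     maks = n
--                     break
--             i += 1
--     return maks
-- ===== SOURCE B (Python) =====
-- def multi(T: list):
--     best = 0
--     for s in T:
--         if len(s) > best and _repeats(s):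
--             best = len(s)
--     return best
--
--
-- def _repeats(s):
--     # s is a repetition of a shorter block iff it has a period p with
--     # p | n and 2*p <= n, tested as s[p:] == s[:n-p]; divisors found in pairs up to sqrt(n)
--     n = len(s)
--     d = 1
--     while d * d <= n:
--         if n % d == 0:
--             if 2 * d <= n and s[d:] == s[:n - d]:
--                 return True
--             q = n // d
--             if 2 * q <= n and s[q:] == s[:n - q]:
--                 return True
--         d += 1
--     return False
-- ===== Notes on version B (the rewrite author's own statement) =====
-- stated objective: faster
-- what changed: Per candidate string B enumerates divisors only up to sqrt(n) (taking each cofactor n//d as well) and tests a period p with a single shift comparison s[p:] == s[:n-p], instead of A's trial of every block length i = 1..n/2 with an inner Python loop comparing all n/i blocks; B also skips any string no longer than the best length found so far.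
import Mathlib
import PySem

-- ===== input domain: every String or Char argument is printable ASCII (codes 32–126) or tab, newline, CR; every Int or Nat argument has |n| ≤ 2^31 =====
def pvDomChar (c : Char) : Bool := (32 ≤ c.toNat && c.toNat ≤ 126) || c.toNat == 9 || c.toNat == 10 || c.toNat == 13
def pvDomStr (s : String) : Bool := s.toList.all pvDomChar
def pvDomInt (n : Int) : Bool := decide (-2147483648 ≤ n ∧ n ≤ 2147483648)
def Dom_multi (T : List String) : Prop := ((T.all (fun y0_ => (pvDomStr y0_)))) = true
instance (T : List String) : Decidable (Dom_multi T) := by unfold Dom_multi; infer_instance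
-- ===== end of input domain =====

-- B replaces A's trial of every block length with divisor-pair enumeration up to sqrt(n)
-- plus a single shift comparison per divisor (objective: faster).

-- ===== PORT A =====
-- inner 'while j < n' loop of A (fuel = enough iterations; j grows by i ≥ 1 each step)
def multiJ (frag s : List Char) (n i j : Int) (fuel : Nat) : Bool :=
  match fuel with
  | 0 => true
  | fuel' + 1 =>
    if j < n then
      if frag ≠ PySem.List.slice s (some j) (some (j + i)) then false
      else multiJ frag s n i (j + i) fuel'
    else true

-- outer 'while i <= n/2' loop of A; 'i <= n/2' (true division) is exactly '2*i ≤ n' for integers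
def multiI (s : List Char) (n maks i : Int) (fuel : Nat) : Int :=
  match fuel with
  | 0 => maks
  | fuel' + 1 =>
    if 2 * i ≤ n then
      if PySem.Int.mod n i = 0 then
        let frag := PySem.List.slice s none (some i)
        let flag := multiJ frag s n i i n.toNat
        if flag = true ∧ maks < n then n
        else multiI s n maks (i + 1) fuel'
      else multiI s n maks (i + 1) fuel'
    else maks

def multi (T : List String) : Int :=
  T.foldl (fun maks napis =>
    let s := napis.toList
    let n : Int := (s.length : Int)
    multiI s n maks 1 n.toNat) 0

-- ===== PORT B =====
-- Source B's 'while d*d <= n' divisor loop of _repeats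
def multiAltLoop (s : List Char) (n d : Int) (fuel : Nat) : Bool :=
  match fuel with
  | 0 => false
  | fuel' + 1 =>
    if d * d ≤ n then
      if PySem.Int.mod n d = 0 then
        if 2 * d ≤ n ∧ PySem.List.slice s (some d) none = PySem.List.slice s none (some (n - d)) then true
        else
          let q := PySem.Int.floordiv n d
          if 2 * q ≤ n ∧ PySem.List.slice s (some q) none = PySem.List.slice s none (some (n - q)) then true
          else multiAltLoop s n (d + 1) fuel'
      else multiAltLoop s n (d + 1) fuel'
    else false

def multiRepeats (s : List Char) : Bool :=
  multiAltLoop s (s.length : Int) 1 (s.length + 1)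

def multi_alt (T : List String) : Int :=
  T.foldl (fun best s =>
    if (s.toList.length : Int) > best ∧ multiRepeats s.toList = true then (s.toList.length : Int)
    else best) 0

-- ===== PRECONDITION & SPEC =====
def Spec_multi (T : List String) (out : Int) : Prop := out = multi_alt T
instance (T : List String) (out : Int) : Decidable (Spec_multi T out) := by unfold Spec_multi; infer_instance

-- ===== CLAIM (what is proved, stated in full; the proofs are below) =====
def Claim_equal_multi : Prop := ∀ (T : List String), Dom_multi T → Spec_multi T (multi T)

-- ===== LEMMAS AND PROOFS =====

lemma multiJ_char (frag s : List Char) (n i : Int) :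
    ∀ (fuel : Nat) (j : Int), 1 ≤ i → n ≤ j + fuel →
    (multiJ frag s n i j fuel = true ↔
      ∀ k : Nat, j + k * i < n → frag = PySem.List.slice s (some (j + k * i)) (some (j + k * i + i))) := by
  intro fuel
  induction fuel with
  | zero =>
    intro j hi hle
    push_cast at hle
    constructor
    · intro _ k hk
      exfalso
      have : (0:Int) ≤ (k:Int) * i := mul_nonneg (by positivity) (by omega)
      omega
    · intro _; rfl
  | succ fuel ih =>
    intro j hi hle
    push_cast at hle
    by_cases hj : j < n
    · by_cases hfr : frag = PySem.List.slice s (some j) (some (j+i))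
      · have h1 : multiJ frag s n i j (fuel+1) = multiJ frag s n i (j+i) fuel := by
          simp [multiJ, hj, hfr]
        rw [h1, ih (j+i) hi (by omega)]
        constructor
        · intro h k hk
          cases k with
          | zero => simpa using hfr
          | succ k =>
            have e1 : j + ((k:Int)+1) * i = (j+i) + (k:Int)*i := by ring
            push_cast at hk ⊢
            rw [e1] at hk ⊢
            exact h k hk
        · intro h k hk
          have e1 : (j+i) + (k:Int)*i = j + ((k:Int)+1)*i := by ring
          rw [e1] at hk ⊢
          have := h (k+1) (by push_cast; exact hk)
          push_cast at this; exact this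
      · have h1 : multiJ frag s n i j (fuel+1) = false := by
          simp [multiJ, hj, hfr]
        rw [h1]
        simp only [Bool.false_eq_true, false_iff]
        intro h
        exact hfr (by simpa using h 0 (by simpa using hj))
    · have h1 : multiJ frag s n i j (fuel+1) = true := by
        simp [multiJ, hj]
      rw [h1]
      simp only [true_iff]
      intro k hk
      exfalso
      have : (0:Int) ≤ (k:Int) * i := mul_nonneg (by positivity) (by omega)
      omega

lemma multiI_big (s : List Char) (n : Int) :
    ∀ (fuel : Nat) (i maks : Int), n ≤ maks → multiI s n maks i fuel = maks := by
  intro fuel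
  induction fuel with
  | zero => intro i maks _; simp [multiI]
  | succ fuel ih =>
    intro i maks h
    simp only [multiI]
    split_ifs with h1 h2 h3
    · omega
    · exact ih _ _ h
    · exact ih _ _ h
    · rfl

lemma multiI_none (s : List Char) (n : Int) :
    ∀ (fuel : Nat) (i maks : Int),
      (∀ k : Int, i ≤ k → 2 * k ≤ n → PySem.Int.mod n k = 0 →
        multiJ (PySem.List.slice s none (some k)) s n k k n.toNat = false) →
      multiI s n maks i fuel = maks := by
  intro fuel
  induction fuel with
  | zero => intro i maks _; simp [multiI]
  | succ fuel ih =>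
    intro i maks h
    simp only [multiI]
    split_ifs with h1 h2 h3
    · rw [h i le_rfl h1 h2] at h3
      simp at h3
    · exact ih _ _ (fun k hk => h k (by omega))
    · exact ih _ _ (fun k hk => h k (by omega))
    · rfl

lemma multiI_pos (s : List Char) (n : Int) :
    ∀ (fuel : Nat) (i maks : Int), 1 ≤ i → n < i + fuel → maks < n →
      (∃ k : Int, i ≤ k ∧ 2 * k ≤ n ∧ PySem.Int.mod n k = 0 ∧
        multiJ (PySem.List.slice s none (some k)) s n k k n.toNat = true) →
      multiI s n maks i fuel = n := by
  intro fuel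
  induction fuel with
  | zero =>
    rintro i maks hi hfu hm ⟨k, hik, h2k, -, -⟩
    exfalso; push_cast at hfu; omega
  | succ fuel ih =>
    rintro i maks hi hfu hm ⟨k, hik, h2k, hmod, hJ⟩
    push_cast at hfu
    simp only [multiI]
    split_ifs with h1 h2 h3
    · rfl
    · have hki : k ≠ i := by
        intro he; subst he
        exact h3 ⟨hJ, hm⟩
      exact ih _ _ (by omega) (by omega) hm ⟨k, by omega, h2k, hmod, hJ⟩
    · have hki : k ≠ i := by
        intro he; subst he; exact h2 hmod
      exact ih _ _ (by omega) (by omega) hm ⟨k, by omega, h2k, hmod, hJ⟩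
    · exfalso; omega

def PerL (s : List Char) (i : Nat) : Prop :=
  s.drop i = s.take (s.length - i)

def PW (s : List Char) (i : Nat) : Prop :=
  ∀ m r : Nat, r < i → m * i + r < s.length → s[m * i + r]? = s[r]?

lemma perL_iff_pt (s : List Char) (i : Nat) :
    PerL s i ↔ ∀ t : Nat, t + i < s.length → s[t + i]? = s[t]? := by
  unfold PerL
  constructor
  · intro h t ht
    have h1 : (s.drop i)[t]? = (s.take (s.length - i))[t]? := by rw [h]
    rw [List.getElem?_drop, List.getElem?_take] at h1
    rw [if_pos (by omega)] at h1
    rw [Nat.add_comm t i]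
    exact h1
  · intro h
    apply List.ext_getElem?
    intro t
    rw [List.getElem?_drop, List.getElem?_take]
    by_cases ht : t < s.length - i
    · rw [if_pos ht, Nat.add_comm i t]
      exact h t (by omega)
    · rw [if_neg ht]
      apply List.getElem?_eq_none
      omega

lemma pt_iff_pw (s : List Char) (i : Nat) (hi : 1 ≤ i) :
    (∀ t : Nat, t + i < s.length → s[t + i]? = s[t]?) ↔ PW s i := by
  constructor
  · intro h m
    induction m with
    | zero => intro r _ _; simp
    | succ m ihm =>
      intro r hr hlen
      have e : (m + 1) * i + r = (m * i + r) + i := by ring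
      rw [e] at hlen ⊢
      rw [h (m * i + r) hlen]
      exact ihm r hr (by omega)
  · intro h t ht
    obtain ⟨m, r, hr, rfl⟩ : ∃ m r, r < i ∧ m * i + r = t :=
      ⟨t / i, t % i, Nat.mod_lt t (by omega), by rw [Nat.mul_comm]; exact Nat.div_add_mod t i⟩
    have e2 : m * i + r + i = (m + 1) * i + r := by ring
    rw [e2] at ht ⊢
    rw [h (m + 1) r hr ht, h m r hr (by omega)]

lemma blocks_iff_pw (s : List Char) (i : Nat) (hd : i ∣ s.length) :
    (∀ m : Nat, 1 ≤ m → m * i < s.length →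
        s.take i = (s.drop (m * i)).take i) ↔ PW s i := by
  constructor
  · intro h m r hr hlen
    cases m with
    | zero => simp
    | succ m =>
      have hb := h (m + 1) (by omega) (by omega)
      have h1 : (s.take i)[r]? = ((s.drop ((m + 1) * i)).take i)[r]? := by rw [hb]
      rw [List.getElem?_take, List.getElem?_take, List.getElem?_drop,
        if_pos hr, if_pos hr] at h1
      exact h1.symm
  · intro hpw m hm hmlt
    apply List.ext_getElem?
    intro r
    rw [List.getElem?_take, List.getElem?_take, List.getElem?_drop]
    by_cases hr : r < i
    · rw [if_pos hr, if_pos hr]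
      have hdm : i ∣ m * i := dvd_mul_left i m
      have hsub : i ∣ s.length - m * i := Nat.dvd_sub hd hdm
      have hle : i ≤ s.length - m * i := Nat.le_of_dvd (by omega) hsub
      exact (hpw m r hr (by omega)).symm
    · rw [if_neg hr, if_neg hr]

lemma pair_iff (n : Nat) (per : Nat → Prop) :
    (∃ i, 1 ≤ i ∧ 2 * i ≤ n ∧ i ∣ n ∧ per i) ↔
    (∃ d, 1 ≤ d ∧ d * d ≤ n ∧ d ∣ n ∧
      ((2 * d ≤ n ∧ per d) ∨ (2 * (n / d) ≤ n ∧ per (n / d)))) := by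
  constructor
  · rintro ⟨i, hi1, hi2, hid, hp⟩
    by_cases hsq : i * i ≤ n
    · exact ⟨i, hi1, hsq, hid, Or.inl ⟨hi2, hp⟩⟩
    · refine ⟨n / i, ?_, ?_, Nat.div_dvd_of_dvd hid, Or.inr ?_⟩
      · have : i ≤ n := by omega
        exact Nat.one_le_div_iff (by omega) |>.mpr this
      · have h1 : n / i ≤ i := by
          rcases Nat.lt_or_ge i (n / i) with h | h
          · exfalso; have h2 := Nat.div_mul_le_self n i; nlinarith
          · exact h
        calc n / i * (n / i) ≤ n / i * i := Nat.mul_le_mul_left _ h1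
          _ ≤ n := Nat.div_mul_le_self n i
      · have hni : 1 ≤ n / i := Nat.one_le_div_iff (by omega) |>.mpr (by omega)
        have hinv : n / (n / i) = i := Nat.div_div_self hid (by omega)
        rw [hinv]
        exact ⟨hi2, hp⟩
  · rintro ⟨d, hd1, hdd, hdn, h | h⟩
    · exact ⟨d, hd1, h.1, hdn, h.2⟩
    · have hn1 : 1 ≤ n := by nlinarith
      have : 1 ≤ n / d := Nat.one_le_div_iff (by omega) |>.mpr (Nat.le_of_dvd (by omega) hdn)
      exact ⟨n / d, this, h.1, Nat.div_dvd_of_dvd hdn, h.2⟩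

def RepL (s : List Char) : Prop :=
  ∃ i : Nat, 1 ≤ i ∧ 2 * i ≤ s.length ∧ i ∣ s.length ∧ PerL s i

lemma perL_iff_blocks (s : List Char) (i : Nat) (hi : 1 ≤ i) (hd : i ∣ s.length) :
    PerL s i ↔ (∀ m : Nat, 1 ≤ m → m * i < s.length →
        s.take i = (s.drop (m * i)).take i) := by
  rw [blocks_iff_pw s i hd, ← pt_iff_pw s i hi, perL_iff_pt]

lemma hitA_elem (s : List Char) (kN : Nat) (hk : 1 ≤ kN) (hdvd : kN ∣ s.length) :
    (multiJ (PySem.List.slice s none (some (kN : Int))) s (s.length : Int)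
        (kN : Int) (kN : Int) ((s.length : Int)).toNat = true)
      ↔ PerL s kN := by
  rw [multiJ_char _ s _ _ ((s.length : Int)).toNat (kN : Int)
    (by exact_mod_cast hk) (by simp)]
  rw [perL_iff_blocks s kN hk hdvd]
  constructor
  · intro h M hM1 hMlt
    obtain ⟨m, rfl⟩ : ∃ m, M = m + 1 := ⟨M - 1, by omega⟩
    have e : ((kN : Int) + (m : Int) * (kN : Int)) = (((m + 1) * kN : Nat) : Int) := by
      push_cast; ring
    have hcond : (kN : Int) + (m : Int) * (kN : Int) < ((s.length : Int)) := by
      rw [e]; exact_mod_cast hMlt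
    have := h m hcond
    rw [e] at this
    rw [PySem.List.slice_to_natCast, PySem.List.slice_natCast_add] at this
    exact this
  · intro h m hcond
    have e : ((kN : Int) + (m : Int) * (kN : Int)) = (((m + 1) * kN : Nat) : Int) := by
      push_cast; ring
    rw [e] at hcond ⊢
    rw [PySem.List.slice_to_natCast, PySem.List.slice_natCast_add]
    exact h (m + 1) (by omega) (by exact_mod_cast hcond)

lemma hitA_iff_repL (s : List Char) :
    (∃ k : Int, 1 ≤ k ∧ 2 * k ≤ (s.length : Int) ∧ PySem.Int.mod (s.length : Int) k = 0 ∧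
        multiJ (PySem.List.slice s none (some k)) s (s.length : Int) k k
          ((s.length : Int)).toNat = true)
      ↔ RepL s := by
  constructor
  · rintro ⟨k, hk1, hk2, hkmod, hkJ⟩
    obtain ⟨kN, rfl⟩ : ∃ kN : Nat, k = (kN : Int) :=
      ⟨k.toNat, (Int.toNat_of_nonneg (by omega)).symm⟩
    have hk : 1 ≤ kN := by exact_mod_cast hk1
    have hdvd : kN ∣ s.length := by
      have := (PySem.Int.mod_eq_zero_iff_dvd _ _).mp hkmod
      exact_mod_cast this
    exact ⟨kN, hk, by exact_mod_cast hk2, hdvd, (hitA_elem s kN hk hdvd).mp hkJ⟩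
  · rintro ⟨kN, hk, h2, hdvd, hper⟩
    refine ⟨(kN : Int), by exact_mod_cast hk, by exact_mod_cast h2, ?_, ?_⟩
    · exact (PySem.Int.mod_eq_zero_iff_dvd _ _).mpr (by exact_mod_cast hdvd)
    · exact (hitA_elem s kN hk hdvd).mpr hper

lemma multiAltLoop_char (s : List Char) (n : Int) :
    ∀ (fuel : Nat) (d : Int), 1 ≤ d → n < d + fuel →
    (multiAltLoop s n d fuel = true ↔
      ∃ k : Int, d ≤ k ∧ k * k ≤ n ∧ PySem.Int.mod n k = 0 ∧
        ((2 * k ≤ n ∧ PySem.List.slice s (some k) none = PySem.List.slice s none (some (n - k))) ∨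
         (2 * PySem.Int.floordiv n k ≤ n ∧
           PySem.List.slice s (some (PySem.Int.floordiv n k)) none
             = PySem.List.slice s none (some (n - PySem.Int.floordiv n k))))) := by
  intro fuel
  induction fuel with
  | zero =>
    intro d hd hfu
    push_cast at hfu
    simp only [multiAltLoop, Bool.false_eq_true, false_iff]
    rintro ⟨k, hdk, hkk, -, -⟩
    nlinarith
  | succ fuel ih =>
    intro d hd hfu
    push_cast at hfu
    simp only [multiAltLoop]
    split_ifs with h1 h2 h3 h4
    · simp only [true_iff]
      exact ⟨d, le_rfl, h1, h2, Or.inl h3⟩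
    · simp only [true_iff]
      exact ⟨d, le_rfl, h1, h2, Or.inr h4⟩
    · rw [ih (d + 1) (by omega) (by omega)]
      constructor
      · rintro ⟨k, hdk, rest⟩; exact ⟨k, by omega, rest⟩
      · rintro ⟨k, hdk, hkk, hmod, hor⟩
        rcases eq_or_lt_of_le hdk with rfl | hlt
        · rcases hor with h | h
          · exact absurd h h3
          · exact absurd h h4
        · exact ⟨k, by omega, hkk, hmod, hor⟩
    · rw [ih (d + 1) (by omega) (by omega)]
      constructor
      · rintro ⟨k, hdk, rest⟩; exact ⟨k, by omega, rest⟩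
      · rintro ⟨k, hdk, hkk, hmod, hor⟩
        rcases eq_or_lt_of_le hdk with rfl | hlt
        · exact absurd hmod h2
        · exact ⟨k, by omega, hkk, hmod, hor⟩
    · simp only [false_iff]
      rintro ⟨k, hdk, hkk, -, -⟩
      nlinarith

lemma repeats_iff_repL (s : List Char) : multiRepeats s = true ↔ RepL s := by
  unfold multiRepeats
  rw [multiAltLoop_char s (s.length : Int) (s.length + 1) 1 (by omega) (by push_cast; omega)]
  rw [RepL, pair_iff s.length (PerL s)]
  constructor
  · rintro ⟨k, hk1, hkk, hmod, hor⟩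
    obtain ⟨dN, rfl⟩ : ∃ dN : Nat, k = (dN : Int) :=
      ⟨k.toNat, (Int.toNat_of_nonneg (by omega)).symm⟩
    have hd1 : 1 ≤ dN := by exact_mod_cast hk1
    have hdd : dN * dN ≤ s.length := by exact_mod_cast hkk
    have hdvd : dN ∣ s.length := by
      have := (PySem.Int.mod_eq_zero_iff_dvd _ _).mp hmod
      exact_mod_cast this
    refine ⟨dN, hd1, hdd, hdvd, ?_⟩
    rcases hor with ⟨h2, hsl⟩ | ⟨h2, hsl⟩
    · have h2' : 2 * dN ≤ s.length := by exact_mod_cast h2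
      left
      refine ⟨h2', ?_⟩
      rw [PySem.List.slice_from_natCast,
        show ((s.length : Int) - (dN : Int)) = ((s.length - dN : Nat) : Int) by omega,
        PySem.List.slice_to_natCast] at hsl
      exact hsl
    · rw [PySem.Int.floordiv_natCast] at h2 hsl
      have h2' : 2 * (s.length / dN) ≤ s.length := by exact_mod_cast h2
      right
      refine ⟨h2', ?_⟩
      rw [PySem.List.slice_from_natCast,
        show ((s.length : Int) - ((s.length / dN : Nat) : Int)) = ((s.length - s.length / dN : Nat) : Int)
          by have := Nat.div_le_self s.length dN; push_cast; omega,
        PySem.List.slice_to_natCast] at hsl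
      exact hsl
  · rintro ⟨dN, hd1, hdd, hdvd, hor⟩
    refine ⟨(dN : Int), by exact_mod_cast hd1, by exact_mod_cast hdd,
      (PySem.Int.mod_eq_zero_iff_dvd _ _).mpr (by exact_mod_cast hdvd), ?_⟩
    rcases hor with ⟨h2, hper⟩ | ⟨h2, hper⟩
    · left
      refine ⟨by exact_mod_cast h2, ?_⟩
      rw [PySem.List.slice_from_natCast,
        show ((s.length : Int) - (dN : Int)) = ((s.length - dN : Nat) : Int) by omega,
        PySem.List.slice_to_natCast]
      exact hper
    · right
      rw [PySem.Int.floordiv_natCast]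
      refine ⟨by exact_mod_cast h2, ?_⟩
      rw [PySem.List.slice_from_natCast,
        show ((s.length : Int) - ((s.length / dN : Nat) : Int)) = ((s.length - s.length / dN : Nat) : Int)
          by have := Nat.div_le_self s.length dN; push_cast; omega,
        PySem.List.slice_to_natCast]
      exact hper

lemma perString (s : List Char) (maks : Int) :
    multiI s (s.length : Int) maks 1 ((s.length : Int)).toNat =
      if multiRepeats s = true ∧ maks < (s.length : Int) then (s.length : Int) else maks := by
  by_cases hrep : multiRepeats s = true
  · by_cases hm : maks < (s.length : Int)
    · rw [if_pos ⟨hrep, hm⟩]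
      apply multiI_pos s _ _ _ _ le_rfl (by simp) hm
      exact (hitA_iff_repL s).mpr ((repeats_iff_repL s).mp hrep)
    · rw [if_neg (fun h => hm h.2)]
      exact multiI_big s _ _ _ _ (by omega)
  · rw [if_neg (fun h => hrep h.1)]
    apply multiI_none
    intro k hk h2k hmod
    by_contra hc
    have hJ : multiJ (PySem.List.slice s none (some k)) s (s.length : Int) k k
        ((s.length : Int)).toNat = true := by
      cases hb : multiJ (PySem.List.slice s none (some k)) s (s.length : Int) k k
          ((s.length : Int)).toNat
      · exact absurd hb hc
      · rfl
    exact hrep ((repeats_iff_repL s).mpr ((hitA_iff_repL s).mp ⟨k, hk, h2k, hmod, hJ⟩))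

-- ===== VERDICT (by name: the statement is the Claim_ definition above) =====
theorem multi_spec : Claim_equal_multi := by
  intro T _
  unfold Spec_multi multi multi_alt
  refine PySem.List.foldl_congr_mem (init := 0) (h := fun maks x _ => ?_)
  rw [perString]
  by_cases h1 : multiRepeats x.toList = true
  · by_cases h2 : maks < (x.toList.length : Int)
    · rw [if_pos ⟨h1, h2⟩, if_pos ⟨h2, h1⟩]
    · rw [if_neg (fun h => h2 h.2), if_neg (fun h => h2 h.1)]
  · rw [if_neg (fun h => h1 h.1), if_neg (fun h => h1 h.2)]
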